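-- pv_equiv track=rewrite | github.com/Kororu-lab/DMHSS | analysis/step1-1.py | create_subreddit_index
-- ===== SOURCE A (Python) =====
-- def create_subreddit_index(user_movements):
--     subreddit_to_index = {}
--     current_index = 0
--     for subreddit_list in user_movements.values():
--         for subreddit in subreddit_list:
--             if subreddit not in subreddit_to_index:
--                 subreddit_to_index[subreddit] = current_index
--                 current_index += 1
--     return subreddit_to_index
-- ===== SOURCE B (Python) =====
-- def create_subreddit_index(user_movements):
--     flat = [s for lst in user_movements.values() for s in lst]
--     first = {}
--     for pos in range(len(flat) - 1, -1, -1):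
--         first[flat[pos]] = pos
--     order = sorted(first, key=first.get)
--     return {s: i for i, s in enumerate(order)}
-- ===== Notes on version B (the rewrite author's own statement) =====
-- stated objective: alternative
-- what changed: Instead of A's forward loop with a membership test and a running counter, B records each subreddit's first-occurrence position by a reverse overwrite pass over the flattened stream, then sorts the subreddits by that position and enumerates the sorted order.
import Mathlib
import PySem

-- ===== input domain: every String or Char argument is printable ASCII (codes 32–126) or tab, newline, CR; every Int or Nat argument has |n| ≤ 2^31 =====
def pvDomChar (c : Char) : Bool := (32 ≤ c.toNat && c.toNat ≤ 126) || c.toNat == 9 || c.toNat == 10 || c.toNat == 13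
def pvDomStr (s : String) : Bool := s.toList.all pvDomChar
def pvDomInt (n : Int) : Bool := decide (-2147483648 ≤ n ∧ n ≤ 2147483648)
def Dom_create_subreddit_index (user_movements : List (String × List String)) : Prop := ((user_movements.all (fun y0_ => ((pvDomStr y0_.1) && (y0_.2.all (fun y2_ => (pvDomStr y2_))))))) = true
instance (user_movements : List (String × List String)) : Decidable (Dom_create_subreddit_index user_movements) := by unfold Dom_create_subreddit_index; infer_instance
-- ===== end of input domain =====

-- B replaces A's forward membership-check-and-increment loop by a reverse overwrite pass
-- recording first-occurrence positions, then a sort by that position (alternative algorithm).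

-- ===== PORT A =====
-- A: one nested loop over user_movements.values(); a dict and a running counter,
-- inserting each unseen subreddit at the current counter value.
def create_subreddit_index (user_movements : List (String × List String)) : List (String × Int) :=
  (user_movements.foldl
    (fun (st : PySem.Dict String Int × Int) p =>
      p.2.foldl
        (fun st s =>
          if st.1.contains s then st
          else (st.1.insert s st.2, st.2 + 1))
        st)
    (PySem.Dict.empty, 0)).1.items

-- ===== PORT B =====
-- B: flatten the per-user lists; walk positions len-1 .. 0 overwriting first[flat[pos]] = pos,
-- so each subreddit ends up mapped to its FIRST occurrence position; sort the keys by that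
-- position and enumerate the sorted order.  (flat[pos] is ported as pyGetD with default "",
-- exact here because every pos produced by the range is in range.)
def create_subreddit_index_alt (user_movements : List (String × List String)) : List (String × Int) :=
  let flat := (user_movements.map (·.2)).flatten
  let first := (PySem.List.pyRange ((PySem.List.len flat) - 1) (-1) (-1)).foldl
      (fun (d : PySem.Dict String Int) pos => d.insert (PySem.List.pyGetD flat pos "") pos)
      PySem.Dict.empty
  let order := PySem.List.sorted first.keys (fun s => first.getD s 0) false
  (PySem.List.enumerate order).map (fun p => (p.2, p.1))

-- ===== PRECONDITION & SPEC =====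
def Spec_create_subreddit_index (user_movements : List (String × List String)) (out : List (String × Int)) : Prop := out = create_subreddit_index_alt user_movements
instance (user_movements : List (String × List String)) (out : List (String × Int)) : Decidable (Spec_create_subreddit_index user_movements out) := by unfold Spec_create_subreddit_index; infer_instance

-- ===== CLAIM (what is proved, stated in full; the proofs are below) =====
def Claim_equal_create_subreddit_index : Prop := ∀ (user_movements : List (String × List String)), Dom_create_subreddit_index user_movements → Spec_create_subreddit_index user_movements (create_subreddit_index user_movements)

-- ===== LEMMAS AND PROOFS =====

-- ---- A side: A's dict is the first-occurrence dedup of the flattened stream, enumerated ----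

-- the dict built from a seen-list xs: key s ↦ its position in xs
def pvToDict (xs : List String) : PySem.Dict String Int :=
  PySem.Dict.mk (xs.zipIdx.map (fun p => (p.1, (p.2 : Int))))

theorem pvToDict_keys (xs : List String) : (pvToDict xs).keys = xs := by
  simp [pvToDict, PySem.Dict.keys, Function.comp_def]

theorem pvToDict_contains (xs : List String) (s : String) :
    (pvToDict xs).contains s = decide (s ∈ xs) := by
  rw [PySem.Dict.contains_eq_decide_mem_keys, pvToDict_keys]

theorem pvToDict_insert (xs : List String) (s : String) (h : s ∉ xs) :
    (pvToDict xs).insert s (xs.length : Int) = pvToDict (xs ++ [s]) := by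
  apply PySem.Dict.ext
  rw [PySem.Dict.items_insert, pvToDict_contains]
  simp [pvToDict, List.zipIdx_append, h]

-- the inner loop body of A
def pvStep (st : PySem.Dict String Int × Int) (s : String) : PySem.Dict String Int × Int :=
  if st.1.contains s then st else (st.1.insert s st.2, st.2 + 1)

-- A's nested loop is the flat loop over the concatenation
theorem pvFold_flatten (um : List (String × List String)) (st : PySem.Dict String Int × Int) :
    um.foldl (fun st p => p.2.foldl pvStep st) st
      = ((um.map (·.2)).flatten).foldl pvStep st := by
  induction um generalizing st with
  | nil => rfl
  | cons p rest ih => simp [List.foldl_append, ih]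

-- loop invariant: from state (pvToDict seen, |seen|) the flat loop lands at the
-- deduped extension of seen
theorem pvInv (l : List String) (seen : List String) (hn : seen.Nodup) :
    l.foldl pvStep (pvToDict seen, (seen.length : Int))
      = (pvToDict (PySem.Set.update seen l), ((PySem.Set.update seen l).length : Int)) := by
  induction l generalizing seen with
  | nil => simp [PySem.Set.update]
  | cons x xs ih =>
    rw [List.foldl_cons, PySem.Set.update_cons]
    by_cases hx : x ∈ seen
    · have hadd : PySem.Set.add seen x = seen := PySem.Set.add_of_mem hx
      rw [hadd]
      have : pvStep (pvToDict seen, (seen.length : Int)) x = (pvToDict seen, (seen.length : Int)) := by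
        simp [pvStep, pvToDict_contains, hx]
      rw [this, ih seen hn]
    · have hadd : PySem.Set.add seen x = seen ++ [x] := PySem.Set.add_of_not_mem hx
      rw [hadd]
      have : pvStep (pvToDict seen, (seen.length : Int)) x
          = (pvToDict (seen ++ [x]), ((seen ++ [x]).length : Int)) := by
        simp [pvStep, pvToDict_contains, hx, pvToDict_insert seen x hx]
      rw [this, ih (seen ++ [x]) (by
        simp [List.nodup_append, hn]
        intro a ha he
        exact hx (he ▸ ha))]

-- A's canonical form: enumerate the ordered dedup of the flattened stream
theorem pvA_canon (um : List (String × List String)) :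
    create_subreddit_index um
      = (PySem.List.enumerate (PySem.List.dedup ((um.map (·.2)).flatten))).map
          (fun p => (p.2, p.1)) := by
  unfold create_subreddit_index
  have hstep : (fun (st : PySem.Dict String Int × Int) s =>
      if st.1.contains s then st else (st.1.insert s st.2, st.2 + 1)) = pvStep := rfl
  have hempty : (PySem.Dict.empty : PySem.Dict String Int) = pvToDict [] := rfl
  rw [hstep, pvFold_flatten, hempty]
  have h0 : (0 : Int) = (([] : List String).length : Int) := by simp
  rw [h0, pvInv _ [] List.nodup_nil, PySem.Set.update_nil_left,
    ← PySem.List.dedup_eq_ofList]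
  simp [pvToDict, PySem.List.enumerate_eq_zipIdx_map, Function.comp_def]

-- ---- B side ----

theorem pvRange_conv (flat : List String) :
    PySem.List.pyRange ((PySem.List.len flat) - 1) (-1) (-1)
      = List.map (fun k : Nat => (k : Int)) (List.range flat.length).reverse := by
  rw [PySem.List.pyRange_neg_one_eq_reverse, List.map_reverse]
  congr 1
  rw [PySem.List.pyRange_one]
  simp [PySem.List.len]

theorem pvFirst_conv (flat : List String) :
    (PySem.List.pyRange ((PySem.List.len flat) - 1) (-1) (-1)).foldl
        (fun (d : PySem.Dict String Int) pos => d.insert (PySem.List.pyGetD flat pos "") pos)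
        PySem.Dict.empty
      = (List.range flat.length).reverse.foldl
          (fun (d : PySem.Dict String Int) k => d.insert (flat.getD k "") (k : Int))
          PySem.Dict.empty := by
  rw [pvRange_conv, List.foldl_map]
  apply PySem.List.foldl_congr_mem
  intro d k _
  rw [PySem.List.pyGetD_natCast]

theorem pvFoldGet (flat : List String) (m : Nat) (hm : m ≤ flat.length)
    (d : PySem.Dict String Int) (s : String) :
    ((List.range m).reverse.foldl
        (fun (d : PySem.Dict String Int) k => d.insert (flat.getD k "") (k : Int)) d).get? s
      = (Option.map (fun k : Nat => (k : Int)) (PySem.List.index? (flat.take m) s)).or (d.get? s) := by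
  induction m generalizing d with
  | zero => simp [PySem.List.index?]
  | succ m ih =>
    rw [List.range_succ, List.reverse_append]
    simp only [List.reverse_cons, List.reverse_nil, List.nil_append, List.singleton_append,
      List.foldl_cons]
    rw [ih (by omega)]
    have hml : m < flat.length := by omega
    have htake : flat.take (m + 1) = flat.take m ++ [flat[m]] := by
      rw [List.take_add_one]
      simp [List.getElem?_eq_getElem hml]
    have hgetD : flat.getD m "" = flat[m] := by
      simp [List.getD_eq_getElem?_getD, List.getElem?_eq_getElem hml]
    by_cases hmem : s ∈ flat.take m
    · have ⟨k, hk⟩ : ∃ k, PySem.List.index? (flat.take m) s = some k :=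
        Option.isSome_iff_exists.mp ((PySem.List.index?_isSome_iff _ _).mpr hmem)
      rw [htake, PySem.List.index?_append_of_mem _ hmem, hk]
      simp
    · have hnone : PySem.List.index? (flat.take m) s = none :=
        (PySem.List.index?_eq_none_iff _ _).mpr hmem
      rw [hnone, htake, hgetD]
      simp only [Option.map_none, Option.none_or]
      by_cases hsx : s = flat[m]
      · subst hsx
        rw [PySem.List.index?_append_singleton_self _ _ hmem]
        rw [PySem.Dict.get?_insert]
        simp [List.length_take, Nat.min_eq_left (le_of_lt hml)]
      · have : PySem.List.index? (flat.take m ++ [flat[m]]) s = none := by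
          rw [PySem.List.index?_eq_none_iff]
          intro hc
          rcases List.mem_append.mp hc with h | h
          · exact hmem h
          · exact hsx (by simpa using h)
        rw [this, PySem.Dict.get?_insert]
        simp [hsx]

theorem pvMap_getD_range (flat : List String) :
    (List.range flat.length).map (fun k => flat.getD k "") = flat := by
  apply List.ext_getElem
  · simp
  · intro i h1 h2
    simp [List.getD_eq_getElem?_getD, List.getElem?_eq_getElem h2]

theorem pvFirst_keys (flat : List String) :
    ((List.range flat.length).reverse.foldl
        (fun (d : PySem.Dict String Int) k => d.insert (flat.getD k "") (k : Int))
        PySem.Dict.empty).keys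
      = PySem.List.dedup flat.reverse := by
  rw [PySem.Dict.keys_foldl_insert_key _ (fun k => flat.getD k "") (fun _ k => (k : Int))]
  rw [List.map_reverse, pvMap_getD_range]
  rw [show (PySem.Dict.empty : PySem.Dict String Int).keys = [] from rfl,
    PySem.Set.update_nil_left, ← PySem.List.dedup_eq_ofList]

theorem pvContains_eq (s : PySem.Set String) :
    (fun y => !(s.contains y)) = (fun y => decide (y ∉ s)) := by
  funext y
  simp [PySem.Set.contains]

theorem pvUpdate_eq (l : List String) (s : PySem.Set String) :
    PySem.Set.update s l = s ++ (PySem.List.dedup l).filter (fun y => !(s.contains y)) := by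
  induction l generalizing s with
  | nil => simp [PySem.Set.update, PySem.List.dedup]
  | cons x l ih =>
    rw [PySem.Set.update_cons, ih]
    have hded : PySem.List.dedup (x :: l)
        = x :: (PySem.List.dedup l).filter (fun y => !(([x] : PySem.Set String).contains y)) := by
      rw [PySem.List.dedup_eq_ofList, ← PySem.Set.update_nil_left, PySem.Set.update_cons]
      have : PySem.Set.add ([] : PySem.Set String) x = [x] := rfl
      rw [this, ih]
      rfl
    have h1 : (fun y => !(([x] : PySem.Set String).contains y)) = (fun y : String => decide (y ≠ x)) := by
      funext y; simp
    rw [hded, pvContains_eq s, pvContains_eq (s.add x), h1]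
    simp only [List.filter_cons, List.filter_filter]
    by_cases hx : x ∈ s
    · rw [PySem.Set.add_of_mem hx, if_neg (by simp [hx])]
      congr 1
      apply List.filter_congr
      intro y hy
      by_cases hyx : y = x
      · subst hyx; simp [hx]
      · simp [hyx]
    · rw [PySem.Set.add_of_not_mem hx, if_pos (by simp [hx]),
        List.append_assoc, List.singleton_append]
      congr 1
      congr 1
      apply List.filter_congr
      intro y hy
      by_cases hyx : y = x
      · subst hyx; simp
      · simp [hyx]

theorem pvDedup_cons (x : String) (l : List String) :
    PySem.List.dedup (x :: l) = x :: (PySem.List.dedup l).filter (fun y => !(y == x)) := by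
  rw [PySem.List.dedup_eq_ofList, ← PySem.Set.update_nil_left, PySem.Set.update_cons]
  have h0 : PySem.Set.add ([] : PySem.Set String) x = [x] := rfl
  rw [h0, pvUpdate_eq]
  have : (fun y => !(PySem.Set.contains [x] y)) = (fun y : String => !(y == x)) := by
    funext y; by_cases h : y = x <;> simp [PySem.Set.contains, h]
  rw [this]
  rfl

theorem pvIdx_cons (x b : String) (xs : List String) (hb : b ∈ xs) (hne : b ≠ x) :
    (PySem.List.index? (x :: xs) b).getD 0 = (PySem.List.index? xs b).getD 0 + 1 := by
  rw [PySem.List.index?_cons_of_ne _ (fun h => hne h.symm)]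
  obtain ⟨k, hk⟩ := Option.isSome_iff_exists.mp ((PySem.List.index?_isSome_iff _ _).mpr hb)
  rw [hk]
  rfl

theorem pvDedup_pairwise (xs : List String) :
    (PySem.List.dedup xs).Pairwise
      (fun a b => (PySem.List.index? xs a).getD 0 < (PySem.List.index? xs b).getD 0) := by
  induction xs with
  | nil => simp [PySem.List.dedup, PySem.Set.ofList]
  | cons x xs ih =>
    rw [pvDedup_cons, List.pairwise_cons]
    constructor
    · intro b hbf
      obtain ⟨hbd, hbx⟩ := List.mem_filter.mp hbf
      have hbx' : b ≠ x := by simpa using hbx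
      have hbxs : b ∈ xs := (PySem.List.mem_dedup _ _).mp hbd
      rw [PySem.List.index?_cons_self, pvIdx_cons x b xs hbxs hbx']
      simp
    · refine (ih.filter _).imp_of_mem ?_
      intro a b ha hb hr
      obtain ⟨had, hax⟩ := List.mem_filter.mp ha
      obtain ⟨hbd, hbx⟩ := List.mem_filter.mp hb
      rw [pvIdx_cons x a xs ((PySem.List.mem_dedup _ _).mp had) (by simpa using hax),
        pvIdx_cons x b xs ((PySem.List.mem_dedup _ _).mp hbd) (by simpa using hbx)]
      omega

theorem pvSorted_eq (flat : List String) :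
    PySem.List.sorted
        ((PySem.List.pyRange ((PySem.List.len flat) - 1) (-1) (-1)).foldl
          (fun (d : PySem.Dict String Int) pos => d.insert (PySem.List.pyGetD flat pos "") pos)
          PySem.Dict.empty).keys
        (fun s => ((PySem.List.pyRange ((PySem.List.len flat) - 1) (-1) (-1)).foldl
          (fun (d : PySem.Dict String Int) pos => d.insert (PySem.List.pyGetD flat pos "") pos)
          PySem.Dict.empty).getD s 0) false
      = PySem.List.dedup flat := by
  rw [pvFirst_conv]
  set first := (List.range flat.length).reverse.foldl
      (fun (d : PySem.Dict String Int) k => d.insert (flat.getD k "") (k : Int))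
      PySem.Dict.empty with hconv
  have hkeys : first.keys = PySem.List.dedup flat.reverse := pvFirst_keys flat
  have hkey : ∀ s ∈ flat, first.getD s 0 = ((PySem.List.index? flat s).getD 0 : Nat) := by
    intro s hs
    obtain ⟨k, hk⟩ := Option.isSome_iff_exists.mp ((PySem.List.index?_isSome_iff _ _).mpr hs)
    have hget : first.get? s = some (k : Int) := by
      rw [hconv, pvFoldGet flat flat.length le_rfl, List.take_length, hk]
      rfl
    rw [PySem.Dict.getD_eq_get?_getD, hget, hk]
    rfl
  have hperm : (PySem.List.dedup flat).Perm first.keys := by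
    rw [hkeys, List.perm_ext_iff_of_nodup (PySem.List.nodup_dedup _) (PySem.List.nodup_dedup _)]
    intro a
    rw [PySem.List.mem_dedup, PySem.List.mem_dedup, List.mem_reverse]
  have hpair : (PySem.List.dedup flat).Pairwise
      (fun a b => first.getD a 0 < first.getD b 0) := by
    refine (pvDedup_pairwise flat).imp_of_mem ?_
    intro a b ha hb hr
    rw [hkey a ((PySem.List.mem_dedup _ _).mp ha), hkey b ((PySem.List.mem_dedup _ _).mp hb)]
    exact_mod_cast hr
  exact PySem.List.sorted_eq_of_perm_of_pairwise_lt first.keys (PySem.List.dedup flat)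
    (fun s => first.getD s 0) hperm hpair

theorem pvB_canon (um : List (String × List String)) :
    create_subreddit_index_alt um
      = (PySem.List.enumerate (PySem.List.dedup ((um.map (·.2)).flatten))).map
          (fun p => (p.2, p.1)) := by
  have h := pvSorted_eq ((um.map (·.2)).flatten)
  unfold create_subreddit_index_alt
  simp only [h]

-- ===== VERDICT (by name: the statement is the Claim_ definition above) =====
theorem create_subreddit_index_spec : Claim_equal_create_subreddit_index := by
  intro um _
  show create_subreddit_index um = create_subreddit_index_alt um
  rw [pvA_canon, pvB_canon]
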